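-- pv_equiv track=rewrite | github.com/licadatateam/gulong_price_scraper | tiremanila_scraper.py | get_tire_info
-- ===== SOURCE A (Python) =====
-- def get_tire_info(row):
--     '''
--     Helper function to extract tire information
--     terrain, on_stock, year
--     Used by tiremanila_scraper
--
--     Parameters:
--     -----------
--         - row : dataframe row
--
--     Returns:
--         tuple : on_stock status, year, terrain info
--     '''
--
--     on_stock, year, terrain = None, None, None
--     info = row.split('\n')
--
--     for i in info:
--         # status info
--         if i in ['On Stock', 'Pre-Order']:
--             on_stock = i
--
--         # year info
--         elif i.isnumeric():
--             year = i
--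
--         # terrain info
--         else:
--             terrain = i
--
--     return terrain, on_stock, year
-- ===== SOURCE B (Python) =====
-- def get_tire_info(row):
--     lines = row.split('\n')
--     on_stock = next((i for i in reversed(lines) if i in ('On Stock', 'Pre-Order')), None)
--     year = next((i for i in reversed(lines) if i.isnumeric()), None)
--     terrain = next((i for i in reversed(lines)
--                     if not i.isnumeric() and i not in ('On Stock', 'Pre-Order')), None)
--     return terrain, on_stock, year
-- ===== Notes on version B (the rewrite author's own statement) =====
-- stated objective: alternative
-- what changed: Replaced A's single stateful categorizing loop over the lines by three independent reverse searches (next over reversed(lines)), one per result field, with the terrain predicate the exact complement of the other two.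
import Mathlib
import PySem

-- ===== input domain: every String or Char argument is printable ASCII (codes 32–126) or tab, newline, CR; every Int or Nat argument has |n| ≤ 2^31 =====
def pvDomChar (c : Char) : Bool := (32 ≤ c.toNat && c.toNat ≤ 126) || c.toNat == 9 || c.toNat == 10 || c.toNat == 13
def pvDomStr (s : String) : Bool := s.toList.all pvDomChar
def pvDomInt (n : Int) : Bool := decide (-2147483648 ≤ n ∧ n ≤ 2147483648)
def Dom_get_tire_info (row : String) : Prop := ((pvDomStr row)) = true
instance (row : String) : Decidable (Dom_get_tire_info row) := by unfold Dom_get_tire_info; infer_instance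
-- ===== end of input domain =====

-- B replaces A's single stateful categorizing loop by three independent reverse searches,
-- one per result field (objective: alternative decomposition, same cost).
-- Python's str.isnumeric is ported as PySem.Str.strIsdigit — exact on the ASCII domain.

-- ===== PORT A =====
-- status membership test 'i in ['On Stock', 'Pre-Order']'
def pvStatus (i : String) : Bool := i == "On Stock" || i == "Pre-Order"

-- A's loop state is (on_stock, year, terrain); one step per line, branches in A's order.
def pvStepA (st : Option String × Option String × Option String) (i : String) :
    Option String × Option String × Option String :=
  if pvStatus i then (some i, st.2.1, st.2.2)
  else if PySem.Str.strIsdigit i then (st.1, some i, st.2.2)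
  else (st.1, st.2.1, some i)

def get_tire_info (row : String) : Option String × Option String × Option String :=
  -- row.split('\n'): separator is a nonempty literal, so split? is always some; getD [] is never the default
  let info := (PySem.Str.split? row "\n").getD []
  let st := info.foldl pvStepA (none, none, none)
  (st.2.2, st.1, st.2.1)   -- return terrain, on_stock, year

-- ===== PORT B =====
def get_tire_info_alt (row : String) : Option String × Option String × Option String :=
  let lines := (PySem.Str.split? row "\n").getD []
  let on_stock := lines.reverse.find? (fun i => i == "On Stock" || i == "Pre-Order")
  let year := lines.reverse.find? (fun i => PySem.Str.strIsdigit i)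
  let terrain := lines.reverse.find?
    (fun i => !PySem.Str.strIsdigit i && !(i == "On Stock" || i == "Pre-Order"))
  (terrain, on_stock, year)

-- ===== PRECONDITION & SPEC =====
def Spec_get_tire_info (row : String) (out : Option String × Option String × Option String) : Prop := out = get_tire_info_alt row
instance (row : String) (out : Option String × Option String × Option String) : Decidable (Spec_get_tire_info row out) := by unfold Spec_get_tire_info; infer_instance

-- ===== CLAIM (what is proved, stated in full; the proofs are below) =====
def Claim_equal_get_tire_info : Prop := ∀ (row : String), Dom_get_tire_info row → Spec_get_tire_info row (get_tire_info row)

-- ===== LEMMAS AND PROOFS =====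

-- a status string is never numeric
theorem pvStatus_not_digit (i : String) (h : pvStatus i = true) :
    PySem.Str.strIsdigit i = false := by
  unfold pvStatus at h
  rcases Bool.or_eq_true_iff.mp h with h1 | h1 <;>
    · rw [show i = _ from eq_of_beq h1]; decide

-- characterisation of the categorizing fold (generic in the two predicates):
-- each component is the last matching line, or the seed
theorem pvFold_eq (p d : String → Bool) (ls : List String) (o y t : Option String) :
    ls.foldl (fun st i =>
        if p i then (some i, st.2.1, st.2.2)
        else if d i then (st.1, some i, st.2.2)
        else (st.1, st.2.1, some i)) (o, y, t) =
      ((ls.reverse.find? p).or o,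
       (ls.reverse.find? (fun i => !p i && d i)).or y,
       (ls.reverse.find? (fun i => !p i && !d i)).or t) := by
  induction ls generalizing o y t with
  | nil => simp
  | cons a ls ih =>
    simp only [List.foldl_cons, List.reverse_cons, List.find?_append, List.find?_cons,
      List.find?_nil]
    by_cases hp : p a
    · simp [hp, ih, Option.or_assoc]
    · by_cases hd : d a
      · simp [hp, hd, ih, Option.or_assoc]
      · simp [hp, hd, ih, Option.or_assoc]

-- pvStepA is that step with p = pvStatus, d = isnumeric
theorem pvFoldA_eq (ls : List String) (o y t : Option String) :
    ls.foldl pvStepA (o, y, t) =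
      ((ls.reverse.find? pvStatus).or o,
       (ls.reverse.find? (fun i => !pvStatus i && PySem.Str.strIsdigit i)).or y,
       (ls.reverse.find? (fun i => !pvStatus i && !PySem.Str.strIsdigit i)).or t) :=
  pvFold_eq pvStatus (fun i => PySem.Str.strIsdigit i) ls o y t

-- the year predicate with the ¬status guard equals plain isnumeric (status strings are not numeric)
theorem pvYearPred_eq :
    (fun i => !pvStatus i && PySem.Str.strIsdigit i) =
      (fun i => PySem.Str.strIsdigit i) := by
  funext i
  by_cases hs : pvStatus i
  · have h := pvStatus_not_digit i hs
    simp [hs]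
    simpa using h
  · simp [hs]

-- ===== VERDICT (by name: the statement is the Claim_ definition above) =====
theorem get_tire_info_spec : Claim_equal_get_tire_info := by
  intro row _
  unfold Spec_get_tire_info
  simp only [get_tire_info, get_tire_info_alt, pvFoldA_eq, pvYearPred_eq, Option.or_none]
  have hpred : (fun i => !pvStatus i && !PySem.Str.strIsdigit i) =
      (fun i => !PySem.Str.strIsdigit i && !(i == "On Stock" || i == "Pre-Order")) := by
    funext i; exact Bool.and_comm _ _
  rw [hpred]
  rfl
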